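-- pv_equiv track=rewrite | github.com/Lakshmisrigirajala/100days_coding | 100days_superprime.py | super_prime
-- ===== SOURCE A (Python) =====
-- import math
--
-- def prime(n):#11
--     if n>1:
--         for i in range(2,abs(int(math.sqrt(n)))+1):
--             if n%i==0:
--                 return 2
--                 break
--         else:
--             return 1
--     else:
--         return 2
--
-- def super_prime(n):#11
--     l=[]
--     for i in range(2,n+1):# 2 to 12
--         if prime(i)==1:#2,3,5,7,11
--             l.append(i)
--             i+=1
--     list1=l#[2,3,5,7,11]
--     m=len(list1)#5
--     if prime(m)==1:
--         return(2)
--     else: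
--         return(3)
-- ===== SOURCE B (Python) =====
-- def _no_prime_factor(k, primes):
--     # primes is the increasing list of all primes below k (or enough of them):
--     # k has no prime factor <= sqrt(k) iff this returns True
--     for p in primes:
--         if p * p > k:
--             return True
--         if k % p == 0:
--             return False
--     return True
--
--
-- def super_prime(n):
--     primes = []
--     for k in range(2, n + 1):
--         if _no_prime_factor(k, primes):
--             primes.append(k)
--     m = len(primes)
--     return 2 if m >= 2 and _no_prime_factor(m, primes) else 3
-- ===== Notes on version B (the rewrite author's own statement) =====
-- stated objective: faster
-- what changed: A re-tests every candidate by trial division over all integers 2..sqrt(k) (via float sqrt); B maintains the list of primes found so far and trial-divides each candidate only by those primes, breaking at the first prime whose square exceeds the candidate, and reuses that list to test the final count's primality.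
import Mathlib
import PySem

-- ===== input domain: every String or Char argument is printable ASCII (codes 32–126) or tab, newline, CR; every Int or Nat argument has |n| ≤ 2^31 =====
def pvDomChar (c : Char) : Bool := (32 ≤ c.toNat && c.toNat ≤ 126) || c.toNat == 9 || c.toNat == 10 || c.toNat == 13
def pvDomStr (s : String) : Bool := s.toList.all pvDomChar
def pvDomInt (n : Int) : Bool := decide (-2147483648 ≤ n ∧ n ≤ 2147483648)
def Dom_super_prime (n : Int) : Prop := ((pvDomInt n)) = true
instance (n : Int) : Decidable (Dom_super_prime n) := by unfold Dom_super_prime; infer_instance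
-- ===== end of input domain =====

-- B replaces A's per-number trial division over ALL of 2..sqrt(k) with trial division by the
-- primes found so far only, stopping at the first prime past sqrt(k) (objective: faster).

-- ===== PORT A =====
-- the for-loop of prime(): returns 2 on the first divisor, else falls through to the for-else (1)
def primeA_loop (n : Int) : List Int → Int
  | [] => 1
  | i :: rest => if PySem.Int.mod n i = 0 then 2 else primeA_loop n rest

-- prime(n); int(math.sqrt(n)) equals Nat.sqrt n.toNat exactly for the arguments 0 ≤ n ≤ 2^31 it receives here
def primeA (n : Int) : Int :=
  if n > 1 then
    primeA_loop n (PySem.List.pyRange 2 (|(Nat.sqrt n.toNat : Int)| + 1) 1)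
  else 2

def super_prime (n : Int) : Int :=
  let l := (PySem.List.pyRange 2 (n + 1) 1).foldl
    (fun acc i => if primeA i = 1 then acc ++ [i] else acc) ([] : List Int)
  let m : Int := PySem.List.len l
  if primeA m = 1 then 2 else 3

-- ===== PORT B =====
-- _no_prime_factor(k, primes)
def noPF (k : Int) : List Int → Bool
  | [] => true
  | p :: rest =>
    if p * p > k then true
    else if PySem.Int.mod k p = 0 then false
    else noPF k rest

def super_prime_alt (n : Int) : Int :=
  let primes := (PySem.List.pyRange 2 (n + 1) 1).foldl
    (fun acc k => if noPF k acc then acc ++ [k] else acc) ([] : List Int)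
  let m : Int := PySem.List.len primes
  if 2 ≤ m ∧ noPF m primes = true then 2 else 3

-- ===== PRECONDITION & SPEC =====
def Spec_super_prime (n : Int) (out : Int) : Prop := out = super_prime_alt n
instance (n : Int) (out : Int) : Decidable (Spec_super_prime n out) := by unfold Spec_super_prime; infer_instance

-- ===== CLAIM (what is proved, stated in full; the proofs are below) =====
def Claim_equal_super_prime : Prop := ∀ (n : Int), Dom_super_prime n → Spec_super_prime n (super_prime n)

-- ===== LEMMAS AND PROOFS =====

-- the reference list: the primes of [2, b) as Ints, in increasing order
def primesBelow (b : Int) : List Int :=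
  (PySem.List.pyRange 2 b 1).filter (fun i => decide i.toNat.Prime)

lemma primeA_loop_eq_one_iff (n : Int) (xs : List Int) :
    primeA_loop n xs = 1 ↔ ∀ i ∈ xs, ¬ (i ∣ n) := by
  induction xs with
  | nil => simp [primeA_loop]
  | cons i rest ih =>
    simp only [primeA_loop, List.mem_cons]
    by_cases h : PySem.Int.mod n i = 0
    · rw [if_pos h, PySem.Int.mod_eq_zero_iff_dvd] at *
      constructor
      · intro h1; omega
      · intro hall; exact absurd h (hall i (Or.inl rfl))
    · rw [if_neg h, ih]
      rw [PySem.Int.mod_eq_zero_iff_dvd] at h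
      constructor
      · rintro hall j (rfl | hj)
        · exact h
        · exact hall j hj
      · intro hall j hj; exact hall j (Or.inr hj)

-- A's prime() answers 1 exactly on primes (for the nonnegative arguments it gets here)
lemma primeA_eq_one_iff (i : Int) (hi : 0 ≤ i) : primeA i = 1 ↔ i.toNat.Prime := by
  by_cases h1 : i > 1
  · rw [primeA, if_pos h1, abs_of_nonneg (by positivity), primeA_loop_eq_one_iff]
    rw [Nat.prime_def_le_sqrt]
    constructor
    · intro hall
      refine ⟨by omega, fun m h2m hms => ?_⟩
      intro hdvd
      have hd : (m:Int) ∣ i := by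
        have h' : ((m:Nat):Int) ∣ ((i.toNat:Nat):Int) := Int.natCast_dvd_natCast.mpr hdvd
        simpa [Int.toNat_of_nonneg hi] using h'
      refine hall (m:Int) ?_ hd
      rw [PySem.List.mem_pyRange_one]
      constructor
      · exact_mod_cast h2m
      · omega
    · rintro ⟨-, hall⟩ j hj hdvd
      rw [PySem.List.mem_pyRange_one] at hj
      refine hall j.toNat (by omega) (by omega) ?_
      rwa [← Int.natCast_dvd_natCast, Int.toNat_of_nonneg (by omega), Int.toNat_of_nonneg hi]
  · rw [primeA, if_neg h1]
    constructor
    · intro; omega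
    · intro hp; have := hp.two_le; omega

-- noPF on an increasing list of ints ≥ 2 tests exactly the members up to sqrt k
lemma noPF_eq_true_iff (k : Int) (l : List Int) (hl : l.Pairwise (· < ·))
    (h2 : ∀ p ∈ l, 2 ≤ p) :
    noPF k l = true ↔ ∀ p ∈ l, p * p ≤ k → ¬ (p ∣ k) := by
  induction l with
  | nil => simp [noPF]
  | cons p rest ih =>
    rw [List.pairwise_cons] at hl
    have hp2 : 2 ≤ p := h2 p (List.mem_cons_self ..)
    simp only [noPF, List.mem_cons]
    by_cases hsq : p * p > k
    · rw [if_pos hsq]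
      constructor
      · rintro - q (rfl | hq) hqk
        · omega
        · exfalso
          have hpq : p < q := hl.1 q hq
          nlinarith
      · intro; rfl
    · rw [if_neg hsq]
      by_cases hd : PySem.Int.mod k p = 0
      · rw [if_pos hd]
        rw [PySem.Int.mod_eq_zero_iff_dvd] at hd
        constructor
        · intro h; exact absurd h (by simp)
        · intro hall; exact absurd hd (hall p (Or.inl rfl) (by omega))
      · rw [if_neg hd, ih hl.2 (fun q hq => h2 q (List.mem_cons_of_mem _ hq))]
        rw [PySem.Int.mod_eq_zero_iff_dvd] at hd
        constructor
        · rintro hall q (rfl | hq) hqk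
          · exact hd
          · exact hall q hq hqk
        · intro hall q hq; exact hall q (Or.inr hq)

lemma mem_primesBelow {p b : Int} :
    p ∈ primesBelow b ↔ (2 ≤ p ∧ p < b) ∧ p.toNat.Prime := by
  simp [primesBelow, List.mem_filter, PySem.List.mem_pyRange_one]

-- noPF against a full prime table is primality
lemma noPF_primesBelow (k b : Int) (hk : 2 ≤ k) (hkb : k ≤ b) :
    noPF k (primesBelow b) = true ↔ k.toNat.Prime := by
  unfold primesBelow
  rw [noPF_eq_true_iff k _ ((PySem.List.pairwise_lt_pyRange_one 2 b).filter _)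
      (fun p hp => (mem_primesBelow.mp hp).1.1)]
  constructor
  · intro hall
    by_contra hnp
    have h1 : k.toNat ≠ 1 := by omega
    have hq : k.toNat.minFac.Prime := Nat.minFac_prime h1
    have hqd : k.toNat.minFac ∣ k.toNat := Nat.minFac_dvd _
    have hsq : k.toNat.minFac ^ 2 ≤ k.toNat := Nat.minFac_sq_le_self (by omega) hnp
    have h2q : 2 ≤ k.toNat.minFac := hq.two_le
    have hlt : k.toNat.minFac < k.toNat := by nlinarith [sq_nonneg k.toNat.minFac, pow_two k.toNat.minFac]
    refine hall (k.toNat.minFac : Int) ?_ ?_ ?_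
    · rw [show (List.filter (fun i => decide (Nat.Prime i.toNat)) (PySem.List.pyRange 2 b)) = primesBelow b from rfl, mem_primesBelow]
      exact ⟨⟨by exact_mod_cast h2q, by omega⟩, by simpa using hq⟩
    · have := hsq
      rw [pow_two] at this
      have : ((k.toNat.minFac * k.toNat.minFac : Nat) : Int) ≤ ((k.toNat : Nat) : Int) := by exact_mod_cast this
      push_cast at this
      omega
    · have : ((k.toNat.minFac : Nat) : Int) ∣ ((k.toNat : Nat) : Int) := Int.natCast_dvd_natCast.mpr hqd
      rwa [Int.toNat_of_nonneg (by omega)] at this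
  · intro hkP p hp hpk hpd
    obtain ⟨⟨hp2, -⟩, hpP⟩ := mem_primesBelow.mp hp
    have : p.toNat ∣ k.toNat := by
      rwa [← Int.natCast_dvd_natCast, Int.toNat_of_nonneg (by omega), Int.toNat_of_nonneg (by omega)]
    have heq : p.toNat = k.toNat := (Nat.prime_dvd_prime_iff_eq hpP hkP).mp this
    have : p = k := by omega
    subst this
    nlinarith

lemma primesBelow_succ {b : Int} (hb : 2 ≤ b) :
    primesBelow (b + 1) = primesBelow b ++ (if b.toNat.Prime then [b] else []) := by
  unfold primesBelow
  rw [PySem.List.pyRange_one_succ_right hb, List.filter_append]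
  simp [List.filter_cons]

-- A's accumulation loop builds exactly primesBelow
lemma fold_A_eq (b : Int) :
    (PySem.List.pyRange 2 b 1).foldl
      (fun acc i => if primeA i = 1 then acc ++ [i] else acc) ([] : List Int)
      = primesBelow b := by
  have h := PySem.List.foldl_append_if (fun i => decide (primeA i = 1)) (id : Int → Int)
      (PySem.List.pyRange 2 b 1) []
  simp only [List.map_id, List.nil_append, decide_eq_true_iff, id] at h
  rw [h, primesBelow]
  refine List.filter_congr fun i hi => ?_
  rw [PySem.List.mem_pyRange_one] at hi
  simp [primeA_eq_one_iff i (by omega)]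

-- B's accumulation loop builds exactly primesBelow, too
lemma fold_B_eq (b : Int) (hb : 2 ≤ b) :
    (PySem.List.pyRange 2 b 1).foldl
      (fun acc k => if noPF k acc then acc ++ [k] else acc) ([] : List Int)
      = primesBelow b := by
  induction b, hb using Int.le_induction with
  | base => simp [PySem.List.pyRange_one_eq_nil (by omega : (2:Int) ≤ 2), primesBelow]
  | succ b hb ih =>
    rw [PySem.List.pyRange_one_succ_right hb, List.foldl_append, ih]
    simp only [List.foldl_cons, List.foldl_nil]
    rw [primesBelow_succ hb]
    by_cases hp : b.toNat.Prime
    · rw [if_pos ((noPF_primesBelow b b (by omega) le_rfl).mpr hp)]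
      simp [hp]
    · rw [if_neg (by simp [noPF_primesBelow b b (by omega) le_rfl, hp])]
      simp [hp]

-- ===== VERDICT (by name: the statement is the Claim_ definition above) =====
theorem super_prime_spec : Claim_equal_super_prime := by
  unfold Claim_equal_super_prime Spec_super_prime
  intro n _
  by_cases h2 : 2 ≤ n + 1
  · simp only [super_prime, super_prime_alt, fold_A_eq, fold_B_eq _ h2, PySem.List.len_eq]
    have hlen : (primesBelow (n + 1)).length ≤ (PySem.List.pyRange 2 (n + 1) 1).length :=
      List.length_filter_le _ _
    rw [PySem.List.length_pyRange_one] at hlen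
    set m : Int := ((primesBelow (n + 1)).length : Int) with hm
    have hm0 : 0 ≤ m := by positivity
    have hmle : m ≤ n + 1 := by omega
    have key : (primeA m = 1) ↔ (2 ≤ m ∧ noPF m (primesBelow (n + 1)) = true) := by
      rw [primeA_eq_one_iff m hm0]
      constructor
      · intro hp
        have h2m : 2 ≤ m := by have := hp.two_le; omega
        exact ⟨h2m, (noPF_primesBelow m _ h2m hmle).mpr hp⟩
      · rintro ⟨h2m, hn⟩
        exact (noPF_primesBelow m _ h2m hmle).mp hn
    simp only [key]
  · simp [super_prime, super_prime_alt,
      PySem.List.pyRange_one_eq_nil (show n + 1 ≤ 2 by omega), primeA]
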